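-- pv_equiv track=rewrite | github.com/Jubin221192/DataStructure_Python_Jubin | hack.py | search
-- ===== SOURCE A (Python) =====
-- def search(x, y):
--
--     d1 ={}
--
--     d2 ={}
--
--     l1 = []
--     for i in x:
--
--         if i not in d1:
--             d1[i] = 1
--
--         else:
--             d1[i] += 1
--
--     for j in y:
--
--         if j not in d2:
--             d2[j] = 1
--
--         else:
--             d2[j] += 1
--
--             x
--     new_dict={}
--     for key in d1:
--         if key in d2:
--             new_dict[key] = abs(d1[key] - d2[key])
--
--     for key in d1.keys():
--         if not key in d2:
--
--         # Printing difference in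
--         # keys in two dictionary
--             l1.append(d1[key])
--     for key in d2.keys():
--         if not key in d1:
--
--         # Printing difference in
--         # keys in two dictionary
--             l1.append(d2[key])
--     for val in l1:
--         if val >3:
--             return 'NO'
--
--
--     # new_dict = {k: abs(d1[k] - d2[k]) for k in d1.keys() & d2.keys()}
--
--     for key, value in new_dict.items():
--
--         if value >3:
--             return 'NO'
--
--     return 'YES'
-- ===== SOURCE B (Python) =====
-- def search(x, y):
--     # Elimination algorithm, no dictionaries: repeatedly take the first remaining
--     # element of x, compare its multiplicities in both lists, strip it from both;
--     # then drain what is left of y the same way (its x-count is 0 by then).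
--     while x:
--         k = x[0]
--         if abs(x.count(k) - y.count(k)) > 3:
--             return 'NO'
--         x = [e for e in x if e != k]
--         y = [e for e in y if e != k]
--     while y:
--         k = y[0]
--         if y.count(k) > 3:
--             return 'NO'
--         y = [e for e in y if e != k]
--     return 'YES'
-- ===== Notes on version B (the rewrite author's own statement) =====
-- stated objective: alternative
-- what changed: Replaces A's dict frequency counting (two dicts, a common-key difference dict, two leftover-key lists, separate threshold scans) with a dictionary-free elimination loop: repeatedly take the first remaining element, compare its counts in both lists via list.count, and strip all its occurrences from both lists, answering NO on the first excess difference.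
import Mathlib
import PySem

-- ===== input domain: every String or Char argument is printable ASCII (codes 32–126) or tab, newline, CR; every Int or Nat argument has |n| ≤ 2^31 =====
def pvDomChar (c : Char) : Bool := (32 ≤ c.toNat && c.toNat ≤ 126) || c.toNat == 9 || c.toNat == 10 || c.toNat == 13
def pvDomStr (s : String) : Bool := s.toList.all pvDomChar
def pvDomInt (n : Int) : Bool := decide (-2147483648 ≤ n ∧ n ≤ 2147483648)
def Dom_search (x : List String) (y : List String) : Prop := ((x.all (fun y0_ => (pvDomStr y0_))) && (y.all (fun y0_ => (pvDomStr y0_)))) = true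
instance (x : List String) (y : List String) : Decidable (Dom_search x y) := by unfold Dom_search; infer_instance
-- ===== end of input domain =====

-- B replaces A's dictionary counting with a dictionary-free elimination loop (take the first
-- remaining element, compare its counts in both lists, strip its occurrences, repeat);
-- objective: alternative (same answers, different algorithm; not claimed faster).

-- ===== PORT A =====
-- `for val in l1: if val > 3: return 'NO'` — early-return scan over the list of leftover counts
def searchLoop1 : List Int → Option String
  | [] => none
  | v :: rest => if v > 3 then some "NO" else searchLoop1 rest

-- `for key, value in new_dict.items(): if value > 3: return 'NO'`
def searchLoop2 : List (String × Int) → Option String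
  | [] => none
  | p :: rest => if p.2 > 3 then some "NO" else searchLoop2 rest

def search (x : List String) (y : List String) : String :=
  let d1 := x.foldl (fun d i => if d.contains i = false then d.insert i 1 else d.modify i 0 (· + 1)) (PySem.Dict.empty : PySem.Dict String Int)
  let d2 := y.foldl (fun d j => if d.contains j = false then d.insert j 1 else d.modify j 0 (· + 1)) (PySem.Dict.empty : PySem.Dict String Int)
  let newDict := d1.keys.foldl (fun nd key => if d2.contains key then nd.insert key |d1.getD key 0 - d2.getD key 0| else nd) (PySem.Dict.empty : PySem.Dict String Int)
  let l1 := d1.keys.foldl (fun l key => if !(d2.contains key) then l ++ [d1.getD key 0] else l) ([] : List Int)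
  let l1 := d2.keys.foldl (fun l key => if !(d1.contains key) then l ++ [d2.getD key 0] else l) l1
  match searchLoop1 l1 with
  | some r => r
  | none =>
    match searchLoop2 newDict.items with
    | some r => r
    | none => "YES"

-- ===== PORT B =====
-- `while y:` second phase of Source B: x is already exhausted, test is y.count(k) > 3
def altPhase2 : List String → String
  | [] => "YES"
  | j :: ys =>
    if 3 < (PySem.List.count (j :: ys) j : Int) then "NO"
    else altPhase2 ((j :: ys).filter (fun e => e ≠ j))
termination_by y => y.length
decreasing_by
  have h := List.length_filter_le (fun e => decide ¬e = j) ys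
  simp only [List.filter_cons, ne_eq, not_true_eq_false, decide_false, Bool.false_eq_true,
    if_false, List.length_cons]
  omega

-- `while x:` first phase of Source B, eliminating x's head from both lists
def altPhase1 : List String → List String → String
  | [], y => altPhase2 y
  | i :: xs, y =>
    if 3 < |((PySem.List.count (i :: xs) i : Int)) - (PySem.List.count y i : Int)| then "NO"
    else altPhase1 ((i :: xs).filter (fun e => e ≠ i)) (y.filter (fun e => e ≠ i))
termination_by x _ => x.length
decreasing_by
  have h := List.length_filter_le (fun e => decide ¬e = i) xs
  simp only [List.filter_cons, ne_eq, not_true_eq_false, decide_false, Bool.false_eq_true,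
    if_false, List.length_cons]
  omega

def search_alt (x : List String) (y : List String) : String := altPhase1 x y

-- ===== PRECONDITION & SPEC =====
def Spec_search (x : List String) (y : List String) (out : String) : Prop := out = search_alt x y
instance (x : List String) (y : List String) (out : String) : Decidable (Spec_search x y out) := by unfold Spec_search; infer_instance

-- ===== CLAIM (what is proved, stated in full; the proofs are below) =====
def Claim_equal_search : Prop := ∀ (x : List String) (y : List String), Dom_search x y → Spec_search x y (search x y)

-- ===== LEMMAS AND PROOFS =====

-- A's counting step is exactly dict.modify (Counter's step)
theorem stepA_eq (d : PySem.Dict String Int) (i : String) :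
    (if d.contains i = false then d.insert i 1 else d.modify i 0 (· + 1)) = d.modify i 0 (· + 1) := by
  by_cases h : d.contains i = true
  · simp [h]
  · have h' : d.contains i = false := eq_false_of_ne_true h
    simp only [PySem.Dict.modify, h', PySem.Dict.getD_of_not_contains, zero_add]
    simp

theorem foldA_eq_counter (x : List String) :
    x.foldl (fun d i => if d.contains i = false then d.insert i 1 else d.modify i 0 (· + 1)) (PySem.Dict.empty : PySem.Dict String Int)
      = PySem.Dict.counter x := by
  have h : (fun (d : PySem.Dict String Int) (i : String) => if d.contains i = false then d.insert i 1 else d.modify i 0 (· + 1))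
      = fun d i => d.modify i 0 (· + 1) := funext₂ stepA_eq
  rw [h, ← PySem.Dict.counter_eq_foldl]

theorem searchLoop1_eq (l : List Int) :
    searchLoop1 l = if l.any (fun v => 3 < v) then some "NO" else none := by
  induction l with
  | nil => rfl
  | cons v rest ih => by_cases h : 3 < v <;> simp [searchLoop1, h, ih]

theorem searchLoop2_eq (l : List (String × Int)) :
    searchLoop2 l = if l.any (fun p => 3 < p.2) then some "NO" else none := by
  induction l with
  | nil => rfl
  | cons p rest ih =>
    obtain ⟨k, v⟩ := p
    by_cases h : 3 < v
    · simp [searchLoop2, h]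
    · rw [searchLoop2, if_neg h, ih, List.any_cons,
        show (decide (3 < ((k, v) : String × Int).2)) = false from decide_eq_false h, Bool.false_or]

-- a fold that inserts under a condition is the unconditional fold over the filtered list
theorem foldl_insert_filter (l : List String) (p : String → Bool) (v : String → Int) (d : PySem.Dict String Int) :
    l.foldl (fun nd k => if p k then nd.insert k (v k) else nd) d
      = (l.filter p).foldl (fun nd k => nd.insert k (v k)) d := by
  induction l generalizing d with
  | nil => rfl
  | cons k rest ih => by_cases h : p k <;> simp [h, ih]

-- abs of the count difference, as both programs compare it
theorem cond_iff (x y : List String) (k : String) (hky : k ∉ y) :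
    3 < |(x.count k : Int) - (y.count k : Int)| ↔ 3 < (x.count k : Int) := by
  rw [List.count_eq_zero.mpr hky]
  push_cast
  rw [sub_zero, abs_of_nonneg (by positivity)]

-- the fresh-distinct-key insert loop produces exactly the mapped items list
theorem items_foldl_insert_if (l : List String) (v : String → Int) (hl : l.Nodup) :
    (l.foldl (fun nd k => nd.insert k (v k)) (PySem.Dict.empty : PySem.Dict String Int)).items
      = l.map (fun k => (k, v k)) := by
  simpa using PySem.Dict.items_foldl_insert_fresh l (fun a => a) v PySem.Dict.empty
    (fun a _ => PySem.Dict.contains_empty a) (by simpa using hl)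

-- A's early-return structure collapses to one boolean disjunction
theorem match_no (c1 c2 : Bool) :
    (match (if c1 then some "NO" else none : Option String) with
     | some r => r
     | none =>
       match (if c2 then some "NO" else none : Option String) with
       | some r => r
       | none => "YES")
      = if (c1 || c2) then "NO" else "YES" := by
  cases c1 <;> cases c2 <;> rfl

-- A's combined early-return condition is: some element of x ++ y has a count difference > 3
theorem conds_eq (x y : List String) :
    (((((PySem.Dict.counter x).keys.filter (fun key => !(PySem.Dict.counter y).contains key)).map
          (fun key => (PySem.Dict.counter x).getD key 0)
        ++ ((PySem.Dict.counter y).keys.filter (fun key => !(PySem.Dict.counter x).contains key)).map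
          (fun key => (PySem.Dict.counter y).getD key 0)).any (fun v => 3 < v))
      || ((((PySem.Dict.counter x).keys.filter (fun key => (PySem.Dict.counter y).contains key)).map
          (fun key => (key, |(PySem.Dict.counter x).getD key 0 - (PySem.Dict.counter y).getD key 0|))).any (fun p => 3 < p.2)))
    = ((x ++ y).any (fun k => 3 < |(x.count k : Int) - (y.count k : Int)|)) := by
  rw [Bool.eq_iff_iff]
  simp only [Bool.or_eq_true, List.any_append, List.any_map, List.any_filter, List.any_eq_true,
    PySem.Dict.keys_counter, PySem.Set.mem_ofList, PySem.Dict.contains_counter,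
    PySem.Dict.getD_counter, Function.comp, Bool.and_eq_true, Bool.not_eq_true',
    List.contains_eq_mem, decide_eq_true_eq, decide_eq_false_iff_not]
  constructor
  · rintro ((⟨k, hkx, hky, h3⟩ | ⟨k, hky, hkx, h3⟩) | ⟨k, hkx, hky, h3⟩)
    · exact Or.inl ⟨k, hkx, (cond_iff x y k hky).mpr h3⟩
    · refine Or.inr ⟨k, hky, ?_⟩
      rw [abs_sub_comm]
      exact (cond_iff y x k hkx).mpr h3
    · exact Or.inl ⟨k, hkx, h3⟩
  · rintro (⟨k, hkx, h3⟩ | ⟨k, hky, h3⟩)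
    · by_cases hky : k ∈ y
      · exact Or.inr ⟨k, hkx, hky, h3⟩
      · exact Or.inl (Or.inl ⟨k, hkx, hky, (cond_iff x y k hky).mp h3⟩)
    · by_cases hkx : k ∈ x
      · exact Or.inr ⟨k, hkx, hky, h3⟩
      · exact Or.inl (Or.inr ⟨k, hky, hkx, (cond_iff y x k hkx).mp (by rwa [abs_sub_comm] at h3)⟩)

-- filtering out a key with an acceptable count difference does not change the condition
theorem any_filter_bad (x y : List String) (k : String)
    (hk : ¬ 3 < |(x.count k : Int) - (y.count k : Int)|) :
    (((x.filter (fun e => e ≠ k)) ++ (y.filter (fun e => e ≠ k))).any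
        (fun e => 3 < |((x.filter (fun e => e ≠ k)).count e : Int)
                      - ((y.filter (fun e => e ≠ k)).count e : Int)|))
      = ((x ++ y).any (fun e => 3 < |(x.count e : Int) - (y.count e : Int)|)) := by
  rw [Bool.eq_iff_iff]
  simp only [List.any_append, Bool.or_eq_true, List.any_eq_true, List.mem_filter,
    decide_eq_true_eq, ne_eq]
  constructor
  · rintro (⟨e, ⟨he1, hek⟩, h3⟩ | ⟨e, ⟨he1, hek⟩, h3⟩) <;>
    · rw [List.count_filter (by simpa using hek), List.count_filter (by simpa using hek)] at h3
      first
        | exact Or.inl ⟨e, he1, h3⟩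
        | exact Or.inr ⟨e, he1, h3⟩
  · rintro (⟨e, he1, h3⟩ | ⟨e, he1, h3⟩)
    · have hek : ¬ e = k := by rintro rfl; exact hk h3
      refine Or.inl ⟨e, ⟨he1, by simpa using hek⟩, ?_⟩
      rw [List.count_filter (by simpa using hek), List.count_filter (by simpa using hek)]
      exact h3
    · have hek : ¬ e = k := by rintro rfl; exact hk h3
      refine Or.inr ⟨e, ⟨he1, by simpa using hek⟩, ?_⟩
      rw [List.count_filter (by simpa using hek), List.count_filter (by simpa using hek)]
      exact h3

-- the single-list analog, for the second phase
theorem any_filter_bad1 (y : List String) (k : String) (hk : ¬ 3 < (y.count k : Int)) :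
    ((y.filter (fun e => e ≠ k)).any
        (fun e => 3 < ((y.filter (fun e => e ≠ k)).count e : Int)))
      = (y.any (fun e => 3 < (y.count e : Int))) := by
  rw [Bool.eq_iff_iff]
  simp only [List.any_eq_true, List.mem_filter, decide_eq_true_eq, ne_eq]
  constructor
  · rintro ⟨e, ⟨he1, hek⟩, h3⟩
    rw [List.count_filter (by simpa using hek)] at h3
    exact ⟨e, he1, h3⟩
  · rintro ⟨e, he1, h3⟩
    have hek : ¬ e = k := by rintro rfl; exact hk h3
    refine ⟨e, ⟨he1, by simpa using hek⟩, ?_⟩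
    rw [List.count_filter (by simpa using hek)]
    exact h3

-- the second phase computes the one-list threshold condition
theorem phase2_char (y : List String) :
    altPhase2 y = if (y.any (fun k => 3 < (y.count k : Int))) then "NO" else "YES" := by
  induction y using altPhase2.induct with
  | case1 => simp [altPhase2]
  | case2 j ys hbad =>
    rw [altPhase2, if_pos hbad, if_pos]
    simp only [List.any_eq_true, decide_eq_true_eq]
    exact ⟨j, List.mem_cons_self, by simpa [PySem.List.count_eq] using hbad⟩
  | case3 j ys hbad ih =>
    rw [altPhase2, if_neg hbad, ih,
      any_filter_bad1 (j :: ys) j (by simpa [PySem.List.count_eq] using hbad)]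

-- the first phase on an exhausted x reduces to the second phase's condition
theorem phase1_nil (y : List String) :
    altPhase1 [] y
      = if ((([] : List String) ++ y).any
            (fun k => 3 < |(([] : List String).count k : Int) - (y.count k : Int)|)) then "NO" else "YES" := by
  rw [altPhase1, phase2_char]
  have hco : (y.any (fun k => 3 < (y.count k : Int)))
      = ((([] : List String) ++ y).any
          (fun k => 3 < |(([] : List String).count k : Int) - (y.count k : Int)|)) := by
    rw [Bool.eq_iff_iff]
    simp only [List.any_eq_true, List.nil_append, decide_eq_true_eq, List.count_nil,
      Int.natCast_zero, zero_sub, abs_neg]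
    constructor <;> rintro ⟨e, he, h3⟩ <;>
      exact ⟨e, he, by
        simpa [abs_of_nonneg (by positivity : (0:Int) ≤ (List.count e y : Int))] using h3⟩
  rw [hco]

-- the first phase computes exactly the combined condition (induction on x's length)
theorem phase1_char_aux : ∀ (n : Nat) (x y : List String), x.length ≤ n →
    altPhase1 x y
      = if ((x ++ y).any (fun k => 3 < |(x.count k : Int) - (y.count k : Int)|)) then "NO" else "YES" := by
  intro n
  induction n with
  | zero =>
    intro x y h
    cases x with
    | nil => exact phase1_nil y
    | cons i xs => simp at h
  | succ n ih =>
    intro x y h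
    cases x with
    | nil => exact phase1_nil y
    | cons i xs =>
      rw [altPhase1]
      by_cases hbad : 3 < |((PySem.List.count (i :: xs) i : Int)) - (PySem.List.count y i : Int)|
      · rw [if_pos hbad, if_pos]
        simp only [List.any_eq_true, List.mem_append, decide_eq_true_eq]
        exact ⟨i, Or.inl List.mem_cons_self, by simpa [PySem.List.count_eq] using hbad⟩
      · have hlen : ((i :: xs).filter (fun e => e ≠ i)).length ≤ n := by
          have hf := List.length_filter_le (fun e => decide ¬e = i) xs
          simp only [List.filter_cons, ne_eq, not_true_eq_false, decide_false,
            Bool.false_eq_true, if_false]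
          simp only [List.length_cons] at h
          omega
        rw [if_neg hbad, ih _ _ hlen,
          any_filter_bad (i :: xs) y i (by simpa [PySem.List.count_eq] using hbad)]

theorem phase1_char (x y : List String) :
    altPhase1 x y
      = if ((x ++ y).any (fun k => 3 < |(x.count k : Int) - (y.count k : Int)|)) then "NO" else "YES" :=
  phase1_char_aux x.length x y (le_refl _)

theorem search_eq_search_alt (x y : List String) : search x y = search_alt x y := by
  unfold search search_alt
  simp only [foldA_eq_counter, searchLoop1_eq, searchLoop2_eq, PySem.List.foldl_append_if,
    foldl_insert_filter, items_foldl_insert_if _ _ ((PySem.Dict.nodup_keys_counter x).filter _),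
    List.nil_append]
  rw [match_no, conds_eq, phase1_char]

-- ===== VERDICT (by name: the statement is the Claim_ definition above) =====
theorem search_spec : Claim_equal_search := by
  intro x y _
  unfold Spec_search
  exact search_eq_search_alt x y
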